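-- pv_equiv track=rewrite | github.com/NextStat/nextstat.io | scripts/god_run_benchmark.py | _toy_ranges
-- ===== SOURCE A (Python) =====
-- def _toy_ranges(total: int, parts: int) -> list[tuple[int, int]]:
--     base = total // parts
--     rem = total % parts
--     out: list[tuple[int, int]] = []
--     start = 0
--     for p in range(parts):
--         n = base + (1 if p < rem else 0)
--         out.append((start, n))
--         start += n
--     return out
-- ===== SOURCE B (Python) =====
-- def _toy_ranges(total: int, parts: int) -> list[tuple[int, int]]:
--     base, rem = divmod(total, parts)
--     return [(p * base + min(p, rem), base + (1 if p < rem else 0))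
--             for p in range(parts)]
-- ===== Notes on version B (the rewrite author's own statement) =====
-- stated objective: alternative
-- what changed: Replaces the running `start` accumulator and append loop with a stateless comprehension computing each part's start in closed form as p*base + min(p, rem).
import Mathlib
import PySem

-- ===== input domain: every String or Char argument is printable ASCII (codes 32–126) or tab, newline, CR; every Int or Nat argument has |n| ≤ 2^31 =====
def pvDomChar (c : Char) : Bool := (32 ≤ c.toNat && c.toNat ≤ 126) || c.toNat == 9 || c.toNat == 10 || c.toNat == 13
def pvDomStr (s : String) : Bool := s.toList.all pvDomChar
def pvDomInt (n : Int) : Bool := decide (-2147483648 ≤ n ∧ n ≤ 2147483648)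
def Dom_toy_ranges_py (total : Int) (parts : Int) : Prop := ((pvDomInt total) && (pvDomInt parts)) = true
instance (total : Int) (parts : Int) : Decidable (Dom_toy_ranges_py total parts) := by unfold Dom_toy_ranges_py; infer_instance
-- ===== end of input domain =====

-- B replaces A's running `start` accumulator with the closed-form start p*base + min(p, rem),
-- built statelessly per part (objective: alternative decomposition, same cost).

-- ===== PORT A =====
def toy_ranges_py (total : Int) (parts : Int) : List (Int × Int) :=
  let base := PySem.Int.floordiv total parts
  let rem := PySem.Int.mod total parts
  let res := (PySem.List.pyRange 0 parts 1).foldl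
    (fun (st : List (Int × Int) × Int) p =>
      let n := base + (if p < rem then 1 else 0)
      (st.1 ++ [(st.2, n)], st.2 + n)) ([], 0)
  res.1

-- ===== PORT B =====
def toy_ranges_py_alt (total : Int) (parts : Int) : List (Int × Int) :=
  let base := PySem.Int.floordiv total parts
  let rem := PySem.Int.mod total parts
  (PySem.List.pyRange 0 parts 1).map
    (fun p => (p * base + min p rem, base + (if p < rem then 1 else 0)))

-- ===== PRECONDITION & SPEC =====
-- A raises ZeroDivisionError when parts = 0 (so does B); those inputs are excluded.
def Pre_toy_ranges_py (total : Int) (parts : Int) : Prop := parts ≠ 0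
instance (total : Int) (parts : Int) : Decidable (Pre_toy_ranges_py total parts) := by unfold Pre_toy_ranges_py; infer_instance
def pvWitness_toy_ranges_py : Int × Int := (10, 3)

def Spec_toy_ranges_py (total : Int) (parts : Int) (out : List (Int × Int)) : Prop := out = toy_ranges_py_alt total parts
instance (total : Int) (parts : Int) (out : List (Int × Int)) : Decidable (Spec_toy_ranges_py total parts out) := by unfold Spec_toy_ranges_py; infer_instance

-- ===== CLAIM =====
def Claim_equal_toy_ranges_py : Prop := ∀ (total : Int) (parts : Int), Dom_toy_ranges_py total parts → Pre_toy_ranges_py total parts → Spec_toy_ranges_py total parts (toy_ranges_py total parts)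

-- ===== LEMMAS AND PROOFS =====

-- the closed form advances exactly like A's accumulator (for 0 ≤ p)
lemma start_step (base rem p : Int) :
    p * base + min p rem + (base + (if p < rem then 1 else 0))
      = (p + 1) * base + min (p + 1) rem := by
  split_ifs with h <;> ring_nf <;> omega

-- loop invariant: after processing range(0,k), A's state is B's prefix and the closed-form start
lemma loop_inv (base rem : Int) (hr : 0 ≤ rem) (k : Nat) :
    (PySem.List.pyRange 0 (k : Int) 1).foldl
      (fun (st : List (Int × Int) × Int) p =>
        let n := base + (if p < rem then 1 else 0)
        (st.1 ++ [(st.2, n)], st.2 + n)) ([], 0)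
    = ((PySem.List.pyRange 0 (k : Int) 1).map
        (fun p => (p * base + min p rem, base + (if p < rem then 1 else 0))),
       (k : Int) * base + min (k : Int) rem) := by
  induction k with
  | zero => simp [PySem.List.pyRange_one_eq_nil (le_refl (0 : Int)), min_eq_left hr]
  | succ n ih =>
    rw [show ((n + 1 : Nat) : Int) = (n : Int) + 1 by push_cast; ring,
        PySem.List.pyRange_one_succ_right (by positivity), List.foldl_append,
        List.map_append, ih]
    simp only [List.foldl_cons, List.foldl_nil, List.map_cons, List.map_nil]
    exact Prod.ext rfl (start_step base rem (n : Int))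

-- ===== VERDICT =====
theorem toy_ranges_py_spec : Claim_equal_toy_ranges_py := by
  intro total parts _ _
  unfold Spec_toy_ranges_py toy_ranges_py toy_ranges_py_alt
  dsimp only
  by_cases h : parts ≤ 0
  · simp [PySem.List.pyRange_one_eq_nil h]
  · rw [show parts = ((parts.toNat : Nat) : Int) from (Int.toNat_of_nonneg (by omega)).symm,
        loop_inv _ _ (PySem.Int.mod_nonneg _ (b := ((parts.toNat : Nat) : Int)) (by omega))]
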